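-- pv_equiv track=rewrite | github.com/Fabianexe/Superbubble | LSD/cycles/__init__.py | generate_cycle_range
-- ===== SOURCE A (Python) =====
-- def generate_cycle_range(k, pos, end):
--     i = pos
--     if end < pos:
--         while i < end or i >= pos:
--             yield i
--             i = (i + 1) % k
--     else:
--         while i < end:
--             yield i
--             i += 1
-- ===== SOURCE B (Python) =====
-- def generate_cycle_range(k, pos, end):
--     if end < pos:
--         yield from range(pos, k)
--         yield from range(end)
--     else:
--         yield from range(pos, end)
-- ===== Notes on version B (the rewrite author's own statement) =====
-- stated objective: simpler
-- what changed: Decomposes the cyclic range into two plain linear segments, yield from range(pos, k) then range(end) (one segment range(pos, end) in the no-wrap case), eliminating A's stateful walk with a running modular increment and its per-element modulo entirely.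
-- outside the precondition, e.g. on generate_cycle_range(5, 10, 3): A returns [10, 1, 2], B returns [0, 1, 2]; on generate_cycle_range(0, 1, 0): A raises ZeroDivisionError, B returns []; on generate_cycle_range(3, 0, -1): A does not finish within the time limit, B returns [0, 1, 2]
import Mathlib
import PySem

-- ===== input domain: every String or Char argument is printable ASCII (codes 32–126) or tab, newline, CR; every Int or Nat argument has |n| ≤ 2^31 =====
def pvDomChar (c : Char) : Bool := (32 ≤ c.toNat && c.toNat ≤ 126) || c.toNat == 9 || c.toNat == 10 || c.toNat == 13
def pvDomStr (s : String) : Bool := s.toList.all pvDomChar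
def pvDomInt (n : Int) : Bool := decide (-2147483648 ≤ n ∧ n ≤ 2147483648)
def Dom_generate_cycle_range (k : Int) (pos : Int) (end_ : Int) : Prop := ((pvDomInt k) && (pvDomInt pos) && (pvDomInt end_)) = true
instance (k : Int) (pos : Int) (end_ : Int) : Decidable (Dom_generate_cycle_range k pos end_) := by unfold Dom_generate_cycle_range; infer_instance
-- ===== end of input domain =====

-- B decomposes the cyclic range into two plain linear segments (range(pos,k) then
-- range(end)), eliminating A's stateful modular walk (simpler); equivalence is on the
-- list of yielded values.

-- ===== PORT A =====
-- wrap-branch while loop of A: 'while i < end or i >= pos: yield i; i = (i+1) % k'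
-- (fuel makes the same computation total; inside Pre_ it never runs out)
def pvAWrap (k : Int) (end_ : Int) (pos : Int) : Nat → Int → List Int → List Int
  | 0, _, acc => acc.reverse
  | fuel+1, i, acc =>
    if i < end_ ∨ pos ≤ i then pvAWrap k end_ pos fuel (PySem.Int.mod (i+1) k) (i :: acc)
    else acc.reverse

-- no-wrap-branch while loop of A: 'while i < end: yield i; i += 1'
def pvANoWrap (end_ : Int) : Nat → Int → List Int → List Int
  | 0, _, acc => acc.reverse
  | fuel+1, i, acc =>
    if i < end_ then pvANoWrap end_ fuel (i+1) (i :: acc) else acc.reverse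

def generate_cycle_range (k : Int) (pos : Int) (end_ : Int) : List Int :=
  if end_ < pos then pvAWrap k end_ pos (k.toNat + 1) pos []
  else pvANoWrap end_ (end_ - pos).toNat pos []

-- ===== PORT B =====
def generate_cycle_range_alt (k : Int) (pos : Int) (end_ : Int) : List Int :=
  if end_ < pos then
    PySem.List.pyRange pos k 1 ++ PySem.List.pyRange 0 end_ 1
  else
    PySem.List.pyRange pos end_ 1

-- ===== PRECONDITION & SPEC =====
-- In the wrap branch (end_ < pos) A raises ZeroDivisionError when k = 0 and diverges for
-- many arguments outside the function's natural domain (cyclic indices, 0 ≤ end_ < pos < k);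
-- on the remaining wrap inputs where A happens to return (e.g. pos ≥ k), the prefix of raw
-- unreduced indices it yields is an artefact of starting the loop before the first mod, so
-- Pre_ restricts the wrap branch to the natural domain. The no-wrap branch is unrestricted.
def Pre_generate_cycle_range (k : Int) (pos : Int) (end_ : Int) : Prop :=
  end_ < pos → (0 < k ∧ 0 ≤ end_ ∧ pos < k)
instance (k : Int) (pos : Int) (end_ : Int) : Decidable (Pre_generate_cycle_range k pos end_) := by
  unfold Pre_generate_cycle_range; infer_instance

def pvWitness_generate_cycle_range : Int × Int × Int := (5, 3, 1)

def Spec_generate_cycle_range (k : Int) (pos : Int) (end_ : Int) (out : List Int) : Prop :=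
  out = generate_cycle_range_alt k pos end_
instance (k : Int) (pos : Int) (end_ : Int) (out : List Int) : Decidable (Spec_generate_cycle_range k pos end_ out) := by
  unfold Spec_generate_cycle_range; infer_instance

-- ===== CLAIM (what is proved, stated in full; the proofs are below) =====
def Claim_equal_generate_cycle_range : Prop := ∀ (k : Int) (pos : Int) (end_ : Int), Dom_generate_cycle_range k pos end_ → Pre_generate_cycle_range k pos end_ → Spec_generate_cycle_range k pos end_ (generate_cycle_range k pos end_)


-- ===== LEMMAS AND PROOFS =====

-- No-wrap loop computes acc.reverse ++ [i, …, end_-1]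
theorem pvANoWrap_eq (end_ : Int) : ∀ (fuel : Nat) (i : Int) (acc : List Int),
    (end_ - i).toNat ≤ fuel →
    pvANoWrap end_ fuel i acc = acc.reverse ++ PySem.List.pyRange i end_ 1 := by
  intro fuel
  induction fuel with
  | zero =>
    intro i acc h
    have : end_ ≤ i := by omega
    simp [pvANoWrap, PySem.List.pyRange_one_eq_nil this]
  | succ n ih =>
    intro i acc h
    by_cases hi : i < end_
    · rw [pvANoWrap, if_pos hi, ih (i+1) (i :: acc) (by omega),
        PySem.List.pyRange_one_cons hi]
      simp
    · have : end_ ≤ i := by omega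
      simp [pvANoWrap, hi, PySem.List.pyRange_one_eq_nil this]

-- Wrap loop, tail phase: i already wrapped, 0 ≤ i ≤ end_ < pos
theorem pvAWrap_tail (k end_ pos : Int) (hk : 0 < k) (hep : end_ < pos) (hpk : pos < k) :
    ∀ (fuel : Nat) (i : Int) (acc : List Int), 0 ≤ i → i ≤ end_ →
    (end_ - i).toNat ≤ fuel →
    pvAWrap k end_ pos fuel i acc = acc.reverse ++ PySem.List.pyRange i end_ 1 := by
  intro fuel
  induction fuel with
  | zero =>
    intro i acc h0 hie h
    have hno : ¬ (i < end_ ∨ pos ≤ i) := by omega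
    simp [pvAWrap, PySem.List.pyRange_one_eq_nil (show end_ ≤ i by omega)]
  | succ n ih =>
    intro i acc h0 hie h
    by_cases hi : i < end_
    · have hmod : PySem.Int.mod (i+1) k = i + 1 := by
        rw [PySem.Int.mod_eq_emod_of_pos hk]
        exact Int.emod_eq_of_lt (by omega) (by omega)
      rw [pvAWrap, if_pos (Or.inl hi), hmod, ih (i+1) (i :: acc) (by omega) (by omega) (by omega),
        PySem.List.pyRange_one_cons hi]
      simp
    · have hno : ¬ (i < end_ ∨ pos ≤ i) := by omega
      simp [pvAWrap, PySem.List.pyRange_one_eq_nil (show end_ ≤ i by omega), hno]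

-- Wrap loop, head phase: pos ≤ i < k, yields [i, …, k-1] then the tail [0, …, end_-1]
theorem pvAWrap_head (k end_ pos : Int) (hk : 0 < k) (he : 0 ≤ end_) (hep : end_ < pos) (hpk : pos < k) :
    ∀ (fuel : Nat) (i : Int) (acc : List Int), pos ≤ i → i < k →
    (k - i).toNat + end_.toNat ≤ fuel →
    pvAWrap k end_ pos fuel i acc =
      acc.reverse ++ PySem.List.pyRange i k 1 ++ PySem.List.pyRange 0 end_ 1 := by
  intro fuel
  induction fuel with
  | zero => intro i acc h1 h2 h; omega
  | succ n ih =>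
    intro i acc h1 h2 h
    rw [pvAWrap, if_pos (Or.inr h1)]
    by_cases hik : i + 1 < k
    · have hmod : PySem.Int.mod (i+1) k = i + 1 := by
        rw [PySem.Int.mod_eq_emod_of_pos hk]
        exact Int.emod_eq_of_lt (by omega) (by omega)
      rw [hmod, ih (i+1) (i :: acc) (by omega) hik (by omega),
        PySem.List.pyRange_one_cons (show i < k by omega)]
      simp
    · -- i = k - 1: next index wraps to 0, tail phase takes over
      have hik' : i + 1 = k := by omega
      have hmod : PySem.Int.mod (i+1) k = 0 := by
        rw [PySem.Int.mod_eq_emod_of_pos hk, hik']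
        exact Int.emod_self
      rw [hmod, pvAWrap_tail k end_ pos hk hep hpk n 0 (i :: acc) le_rfl he (by omega),
        PySem.List.pyRange_one_cons (show i < k by omega),
        PySem.List.pyRange_one_eq_nil (show k ≤ i + 1 by omega)]
      simp

-- ===== VERDICT (by name: the statement is the Claim_ definition above) =====
theorem generate_cycle_range_spec : Claim_equal_generate_cycle_range := by
  intro k pos end_ _ hpre
  unfold Spec_generate_cycle_range generate_cycle_range generate_cycle_range_alt
  by_cases hw : end_ < pos
  · obtain ⟨hk, he, hpk⟩ := hpre hw
    rw [if_pos hw, if_pos hw,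
      pvAWrap_head k end_ pos hk he hw hpk (k.toNat + 1) pos [] le_rfl hpk (by omega)]
    simp
  · rw [if_neg hw, if_neg hw, pvANoWrap_eq end_ _ pos [] le_rfl]
    simp
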